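-- pv_equiv track=rewrite | github.com/Zuni-W/Nepnep | cry/lfsr.py | LFSR_inv
-- ===== SOURCE A (Python) =====
-- def LFSR_inv(R,mask):
--     str=bin(R)[2:].zfill(32)
--     new=str[-1:]+str[:-1]
--     new=int(new,2)
--     i = (new & mask) & 0xffffffff
--     lastbit = 0
--     while i != 0:
--         lastbit ^= (i & 1)
--         i = i >> 1
--     return R>>1 | lastbit<<31
-- ===== SOURCE B (Python) =====
-- def LFSR_inv(R, mask):
--     # rotate right by one arithmetically (exact for 0 <= R <= 2**31, the stated domain)
--     i = (((R >> 1) | ((R & 1) << 31)) & mask) & 0xffffffff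
--     # parity of the masked taps by logarithmic XOR-folding (5 halvings) instead of a bit scan
--     i ^= i >> 16
--     i ^= i >> 8
--     i ^= i >> 4
--     i ^= i >> 2
--     i ^= i >> 1
--     return (R >> 1) | ((i & 1) << 31)
-- ===== Notes on version B (the rewrite author's own statement) =====
-- stated objective: alternative
-- what changed: B drops A's bin()/zfill/slice string rotation for the arithmetic 32-bit rotation (R>>1)|((R&1)<<31) and replaces A's 32-iteration bit-by-bit parity while-loop by the logarithmic XOR-fold cascade (i^=i>>16; i^=i>>8; i^=i>>4; i^=i>>2; i^=i>>1; i&1), which folds the same parity in 5 halving steps.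
import Mathlib
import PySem

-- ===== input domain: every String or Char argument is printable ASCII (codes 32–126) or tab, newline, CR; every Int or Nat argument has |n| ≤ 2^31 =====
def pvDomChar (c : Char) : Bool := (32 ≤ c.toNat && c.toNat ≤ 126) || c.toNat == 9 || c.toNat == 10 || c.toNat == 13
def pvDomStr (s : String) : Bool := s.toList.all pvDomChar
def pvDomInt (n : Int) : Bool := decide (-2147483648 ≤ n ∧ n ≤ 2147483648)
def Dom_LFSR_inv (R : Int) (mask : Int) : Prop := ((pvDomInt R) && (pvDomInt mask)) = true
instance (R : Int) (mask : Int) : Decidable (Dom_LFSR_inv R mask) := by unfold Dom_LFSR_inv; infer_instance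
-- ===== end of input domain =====

-- B replaces A's bin()/zfill/string-slice rotation by the arithmetic 32-bit rotation and A's
-- bit-by-bit parity while-loop by the 5-step XOR-folding parity cascade; proved equal for 0 ≤ R
-- (A raises ValueError on negative R).


-- ===== PORT A =====

-- bin(n)[2:] for n ≥ 1 (most-significant digit first); exact transcription of CPython's binary repr
def pvBinGo (n : Nat) : List Char :=
  if n = 0 then [] else pvBinGo (n / 2) ++ [if n % 2 = 1 then '1' else '0']
decreasing_by exact Nat.div_lt_self (by omega) (by omega)

-- bin(n)[2:] for n ≥ 0 (bin(0)[2:] = "0")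
def pvBin (n : Nat) : List Char := if n = 0 then ['0'] else pvBinGo n

-- s.zfill(32): left-pad with '0' to length 32 (digits only here, so no sign handling)
def pvZfill32 (s : List Char) : List Char := List.replicate (32 - s.length) '0' ++ s

-- int(s, 2) with accumulator a; exact for strings of '0'/'1' digits (the only ones A builds)
def pvParse (a : Nat) (s : List Char) : Nat :=
  s.foldl (fun a c => 2 * a + (if c = '1' then 1 else 0)) a

-- A's while loop: `while i != 0: lastbit ^= i & 1; i >>= 1` — on Nat, exact since A's i is ≥ 0
def pvParityLoop (i lastbit : Nat) : Nat :=
  if i = 0 then lastbit else pvParityLoop (i >>> 1) (lastbit ^^^ (i &&& 1))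
decreasing_by simp only [Nat.shiftRight_one]; exact Nat.div_lt_self (by omega) (by omega)

def LFSR_inv (R : Int) (mask : Int) : Int :=
  -- str = bin(R)[2:].zfill(32); exact for R ≥ 0 (Pre_); A raises ValueError for R < 0
  let s := pvZfill32 (pvBin R.toNat)
  -- new = str[-1:] + str[:-1]; new = int(new, 2)   (s is never empty)
  let new : Int := Int.ofNat (pvParse 0 (s.drop (s.length - 1) ++ s.take (s.length - 1)))
  let i := PySem.Int.band (PySem.Int.band new mask) 0xffffffff
  -- i ≥ 0 after `& 0xffffffff`, so the Nat loop is exact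
  let lastbit := pvParityLoop i.toNat 0
  PySem.Int.bor (R >>> (1 : Nat)) ((Int.ofNat lastbit) <<< (31 : Nat))

-- ===== PORT B =====

def LFSR_inv_alt (R : Int) (mask : Int) : Int :=
  -- i = (((R >> 1) | ((R & 1) << 31)) & mask) & 0xffffffff
  let i0 := PySem.Int.band (PySem.Int.band
      (PySem.Int.bor (R >>> (1 : Nat)) ((PySem.Int.band R 1) <<< (31 : Nat))) mask) 0xffffffff
  -- the XOR-folding parity cascade: i ^= i >> 16; … ; i ^= i >> 1
  let i1 := PySem.Int.bxor i0 (i0 >>> (16 : Nat))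
  let i2 := PySem.Int.bxor i1 (i1 >>> (8 : Nat))
  let i3 := PySem.Int.bxor i2 (i2 >>> (4 : Nat))
  let i4 := PySem.Int.bxor i3 (i3 >>> (2 : Nat))
  let i5 := PySem.Int.bxor i4 (i4 >>> (1 : Nat))
  PySem.Int.bor (R >>> (1 : Nat)) ((PySem.Int.band i5 1) <<< (31 : Nat))

-- ===== PRECONDITION & SPEC =====

-- Pre_ excludes exactly R < 0, where A raises ValueError: bin(R) starts with '-', so
-- bin(R)[2:] begins with 'b' and int(_, 2) fails.
def Pre_LFSR_inv (R : Int) (mask : Int) : Prop := 0 ≤ R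
instance (R : Int) (mask : Int) : Decidable (Pre_LFSR_inv R mask) := by unfold Pre_LFSR_inv; infer_instance

def pvWitness_LFSR_inv : Int × Int := (5, 3)

def Spec_LFSR_inv (R : Int) (mask : Int) (out : Int) : Prop := out = LFSR_inv_alt R mask
instance (R : Int) (mask : Int) (out : Int) : Decidable (Spec_LFSR_inv R mask out) := by unfold Spec_LFSR_inv; infer_instance

-- ===== CLAIM (what is proved, stated in full; the proofs are below) =====
def Claim_equal_LFSR_inv : Prop := ∀ (R : Int) (mask : Int), Dom_LFSR_inv R mask → Pre_LFSR_inv R mask → Spec_LFSR_inv R mask (LFSR_inv R mask)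

-- ===== LEMMAS AND PROOFS =====

theorem pvParse_append (a : Nat) (s t : List Char) :
    pvParse a (s ++ t) = pvParse (pvParse a s) t := by
  simp [pvParse, List.foldl_append]

theorem pvParse_shift (t : List Char) : ∀ a : Nat,
    pvParse a t = a * 2 ^ t.length + pvParse 0 t := by
  induction t with
  | nil => intro a; simp [pvParse]
  | cons c t ih =>
    intro a
    show pvParse (2 * a + (if c = '1' then 1 else 0)) t = _
    rw [ih]
    have h2 : pvParse 0 (c :: t) = (if c = '1' then 1 else 0) * 2 ^ t.length + pvParse 0 t := by
      show pvParse (2 * 0 + (if c = '1' then 1 else 0)) t = _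
      rw [ih]; ring_nf
    rw [h2]
    simp [List.length_cons, Nat.pow_succ]
    by_cases h : c = '1' <;> simp [h] <;> ring

theorem pvParse_replicate (k : Nat) : pvParse 0 (List.replicate k '0') = 0 := by
  induction k with
  | zero => rfl
  | succ k ih =>
    rw [List.replicate_succ]
    show pvParse (2 * 0 + if '0' = '1' then 1 else 0) (List.replicate k '0') = 0
    simpa using ih

theorem pvBinGo_len (k : Nat) : ∀ n : Nat, n < 2 ^ k → (pvBinGo n).length ≤ k := by
  induction k with
  | zero => intro n h; interval_cases n; simp [pvBinGo]
  | succ k ih =>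
    intro n h
    rw [pvBinGo]
    split
    · simp
    · rw [List.length_append]
      have := ih (n / 2) (by omega)
      simp; omega

theorem pvParse_binGo (n : Nat) : ∀ a : Nat,
    pvParse a (pvBinGo n) = a * 2 ^ (pvBinGo n).length + n := by
  induction n using Nat.strong_induction_on with
  | _ n ih =>
    intro a
    rw [pvBinGo]
    split
    · simp [pvParse]; omega
    · rename_i hn
      rw [pvParse_append, List.length_append]
      have h2 := ih (n / 2) (Nat.div_lt_self (by omega) (by omega)) a
      show pvParse (pvParse a (pvBinGo (n / 2))) [if n % 2 = 1 then '1' else '0'] = _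
      have hstep : pvParse (pvParse a (pvBinGo (n / 2))) [if n % 2 = 1 then '1' else '0'] =
          2 * pvParse a (pvBinGo (n / 2)) + n % 2 := by
        by_cases h : n % 2 = 1 <;> simp [h, pvParse] <;> omega
      rw [hstep, h2]
      simp [Nat.pow_succ]
      ring_nf
      omega

theorem pvParse_bin (n : Nat) : pvParse 0 (pvBin n) = n := by
  rw [pvBin]
  split
  · simp [pvParse]; omega
  · rw [pvParse_binGo]; ring

theorem pvBin_len_le (n : Nat) (h : n < 2 ^ 32) : (pvBin n).length ≤ 32 := by
  rw [pvBin]; split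
  · simp
  · exact pvBinGo_len 32 n h

theorem pvBin_ne_nil (n : Nat) : (pvBin n).length ≠ 0 := by
  rw [pvBin]; split
  · simp
  · rename_i h
    rw [pvBinGo]
    simp [h]

-- the rotated 32-bit string of n parses to n % 2 * 2^31 + n / 2
theorem pvRotate_parse (n : Nat) (h : n ≤ 2 ^ 31) :
    pvParse 0 ((pvZfill32 (pvBin n)).drop ((pvZfill32 (pvBin n)).length - 1) ++
      (pvZfill32 (pvBin n)).take ((pvZfill32 (pvBin n)).length - 1)) =
    n % 2 * 2 ^ 31 + n / 2 := by
  set s := pvZfill32 (pvBin n) with hs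
  have hlen : s.length = 32 := by
    have h1 := pvBin_len_le n (by omega)
    have h2 := pvBin_ne_nil n
    simp [hs, pvZfill32, List.length_append, List.length_replicate]
    omega
  obtain ⟨c, hc⟩ : ∃ c, s.drop 31 = [c] := by
    have : (s.drop 31).length = 1 := by rw [List.length_drop, hlen]
    match hd : s.drop 31 with
    | [c] => exact ⟨c, rfl⟩
    | [] => rw [hd] at this; simp at this
    | c :: d :: t => rw [hd] at this; simp at this
  have hsplit : s = s.take 31 ++ [c] := by rw [← hc]; simp
  set b : Nat := if c = '1' then 1 else 0 with hb
  set p : Nat := pvParse 0 (s.take 31) with hp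
  have hsn : pvParse 0 s = n := by
    rw [hs, pvZfill32, pvParse_append, pvParse_replicate]
    have : pvParse 0 (pvBin n) = n := pvParse_bin n
    exact this
  have hval : 2 * p + b = n := by
    have := hsn
    rw [hsplit, pvParse_append, ← hp] at this
    simpa [pvParse, ← hb] using this
  have hble : b ≤ 1 := by rw [hb]; split <;> omega
  have htake : (s.take 31).length = 31 := by rw [List.length_take, hlen]; omega
  rw [hlen]
  show pvParse 0 (s.drop 31 ++ s.take 31) = _
  rw [hc, pvParse_append]
  have hparsec : pvParse 0 [c] = b := by simp [pvParse, hb]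
  rw [hparsec, pvParse_shift, htake, ← hp]
  have hb2 : b = n % 2 := by omega
  have hp2 : p = n / 2 := by omega
  rw [hb2, hp2]

-- the disjoint-bits OR: for m < 2^31, m ||| (b <<< 31) = b * 2^31 + m  (b a bit)
theorem pvOr_rot (m b : Nat) (hm : m < 2 ^ 31) :
    m ||| (b <<< 31) = b * 2 ^ 31 + m := by
  rw [Nat.lor_comm, ← Nat.shiftLeft_add_eq_or_of_lt hm, Nat.shiftLeft_eq]

-- XOR-parity of the lowest w bits of x, peeling the top bit
def pvBitsParity (x : Nat) : Nat → Bool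
  | 0 => false
  | w + 1 => xor (pvBitsParity x w) (x.testBit w)

-- B's cascade, abstractly: k halving steps with shifts 2^(k-1), …, 2, 1
def pvFold (x : Nat) : Nat → Nat
  | 0 => x
  | k + 1 => pvFold (x ^^^ (x >>> 2 ^ k)) k

theorem pvBitsParity_zero (w : Nat) : pvBitsParity 0 w = false := by
  induction w with
  | zero => rfl
  | succ w ih => simp [pvBitsParity, ih]

-- parity distributes over xor (bits are independent)
theorem pvBitsParity_xor (a b : Nat) : ∀ w,
    pvBitsParity (a ^^^ b) w = xor (pvBitsParity a w) (pvBitsParity b w) := by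
  intro w
  induction w with
  | zero => rfl
  | succ w ih =>
    simp only [pvBitsParity, ih, Nat.testBit_xor]
    rcases pvBitsParity a w <;> rcases pvBitsParity b w <;>
      rcases a.testBit w <;> rcases b.testBit w <;> rfl

-- parity splits at position m: low m bits, then the bits of x >>> m
theorem pvBitsParity_split (x m : Nat) : ∀ j,
    pvBitsParity x (m + j) = xor (pvBitsParity x m) (pvBitsParity (x >>> m) j) := by
  intro j
  induction j with
  | zero => simp [pvBitsParity]
  | succ j ih =>
    have : m + (j + 1) = (m + j) + 1 := by omega
    rw [this]
    simp only [pvBitsParity, ih, Nat.testBit_shiftRight, Bool.xor_assoc]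

-- one halving step folds the parity of 2m bits into the parity of m bits
theorem pvFold_step (x m : Nat) :
    pvBitsParity (x ^^^ (x >>> m)) m = pvBitsParity x (m + m) := by
  rw [pvBitsParity_xor, pvBitsParity_split x m m]

-- the cascade's low bit is the parity of the low 2^k bits
theorem pvFold_parity (k : Nat) : ∀ x, (pvFold x k).testBit 0 = pvBitsParity x (2 ^ k) := by
  induction k with
  | zero =>
    intro x
    simp [pvFold, pvBitsParity]
  | succ k ih =>
    intro x
    show (pvFold (x ^^^ (x >>> 2 ^ k)) k).testBit 0 = _
    rw [ih, pvFold_step]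
    congr 1
    rw [pow_succ]
    omega

-- A's loop computes the same bit parity, for any accumulator
theorem pvParityLoop_eq : ∀ w n b, n < 2 ^ w →
    pvParityLoop n b = b ^^^ (pvBitsParity n w).toNat := by
  intro w
  induction w with
  | zero =>
    intro n b h
    interval_cases n
    rw [pvParityLoop]
    simp [pvBitsParity]
  | succ w ih =>
    intro n b h
    rw [pvParityLoop]
    by_cases hn : n = 0
    · simp [hn, pvBitsParity_zero]
    · simp only [hn, if_false]
      rw [ih (n >>> 1) _ (by simp only [Nat.shiftRight_one]; omega)]
      have hsplit : pvBitsParity n (1 + w) = xor (pvBitsParity n 1) (pvBitsParity (n >>> 1) w) :=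
        pvBitsParity_split n 1 w
      rw [Nat.add_comm 1 w] at hsplit
      rw [hsplit]
      have h1 : pvBitsParity n 1 = n.testBit 0 := by simp [pvBitsParity]
      have h2 : n &&& 1 = n % 2 := Nat.and_one_is_mod n
      rw [h1, h2, Nat.xor_assoc]
      congr 1
      rcases Nat.mod_two_eq_zero_or_one n with hm | hm <;>
        rcases hb : pvBitsParity (n >>> 1) w <;>
        simp [Nat.testBit_zero, hm]

theorem pvNatBand1 (f : Nat) : PySem.Int.band (f : Int) 1 = ((f &&& 1 : Nat) : Int) := by
  simpa using PySem.Int.band_natCast f 1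

-- ===== VERDICT (by name: the statement is the Claim_ definition above) =====
theorem LFSR_inv_spec : Claim_equal_LFSR_inv := by
  intro R mask hdom hpre
  unfold Spec_LFSR_inv LFSR_inv LFSR_inv_alt
  have hR : (0:Int) ≤ R := hpre
  obtain ⟨n, rfl⟩ : ∃ n : Nat, R = (n : Int) := ⟨R.toNat, by omega⟩
  have hn : n ≤ 2 ^ 31 := by
    unfold Dom_LFSR_inv pvDomInt at hdom
    simp at hdom
    omega
  -- step 1: the rotated string value equals B's arithmetic rotation
  have hrot : Int.ofNat (pvParse 0 ((pvZfill32 (pvBin ((n:Int)).toNat)).drop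
        ((pvZfill32 (pvBin ((n:Int)).toNat)).length - 1) ++
        (pvZfill32 (pvBin ((n:Int)).toNat)).take ((pvZfill32 (pvBin ((n:Int)).toNat)).length - 1))) =
      PySem.Int.bor ((n:Int) >>> (1 : Nat)) ((PySem.Int.band (n:Int) 1) <<< (31 : Nat)) := by
    rw [Int.toNat_natCast, pvRotate_parse n hn]
    have hband : PySem.Int.band (n:Int) 1 = ((n &&& 1 : Nat) : Int) := by
      have := PySem.Int.band_natCast n 1
      simpa using this
    rw [hband]
    have hsr : ((n:Int) >>> (1 : Nat)) = ((n >>> 1 : Nat) : Int) := rfl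
    have hsl : (((n &&& 1 : Nat) : Int) <<< (31 : Nat)) = (((n &&& 1) <<< 31 : Nat) : Int) := rfl
    rw [hsr, hsl]
    have hbor := PySem.Int.bor_natCast (n >>> 1) ((n &&& 1) <<< 31)
    rw [hbor]
    congr 1
    rw [pvOr_rot (n >>> 1) (n &&& 1) (by simp only [Nat.shiftRight_one]; omega),
      Nat.shiftRight_one, Nat.and_one_is_mod]
  simp only [hrot]
  -- step 2: the masked tap value is a Nat below 2^32
  set rot := PySem.Int.bor ((n:Int) >>> (1 : Nat)) ((PySem.Int.band (n:Int) 1) <<< (31 : Nat)) with hrotdef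
  set i := PySem.Int.band (PySem.Int.band rot mask) 0xffffffff with hi
  have hrotnn : 0 ≤ rot := by rw [← hrot]; exact Int.natCast_nonneg _
  have hy : 0 ≤ PySem.Int.band rot mask := PySem.Int.band_nonneg_of_nonneg_left mask hrotnn
  have hinn : 0 ≤ i := by
    rw [hi, PySem.Int.band_comm]
    exact PySem.Int.band_nonneg_of_nonneg_left _ (by norm_num)
  obtain ⟨m, hm⟩ : ∃ m : Nat, i = (m : Int) := ⟨i.toNat, by omega⟩
  have hmlt : m < 2 ^ 32 := by
    have := PySem.Int.band_of_nonneg hy (by norm_num : (0:Int) ≤ 0xffffffff)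
    rw [hi] at hm
    rw [this] at hm
    have hmle : m ≤ (0xffffffff : Int).toNat := by
      have h2 := Nat.and_le_right (n := (PySem.Int.band rot mask).toNat) (m := (0xffffffff : Int).toNat)
      omega
    norm_num at hmle
    omega
  -- step 3: A's parity loop = B's XOR-fold cascade's low bit
  rw [hm]
  congr 2
  have hcast : ∀ (a k : Nat), ((a:Int) >>> k) = ((a >>> k : Nat) : Int) := fun a k => rfl
  simp only [hcast, PySem.Int.bxor_natCast]
  rw [pvNatBand1]
  have hfold : ((((m ^^^ m >>> 16) ^^^ (m ^^^ m >>> 16) >>> 8) ^^^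
        ((m ^^^ m >>> 16) ^^^ (m ^^^ m >>> 16) >>> 8) >>> 4) ^^^
        (((m ^^^ m >>> 16) ^^^ (m ^^^ m >>> 16) >>> 8) ^^^
        ((m ^^^ m >>> 16) ^^^ (m ^^^ m >>> 16) >>> 8) >>> 4) >>> 2) ^^^
        ((((m ^^^ m >>> 16) ^^^ (m ^^^ m >>> 16) >>> 8) ^^^
        ((m ^^^ m >>> 16) ^^^ (m ^^^ m >>> 16) >>> 8) >>> 4) ^^^
        (((m ^^^ m >>> 16) ^^^ (m ^^^ m >>> 16) >>> 8) ^^^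
        ((m ^^^ m >>> 16) ^^^ (m ^^^ m >>> 16) >>> 8) >>> 4) >>> 2) >>> 1
      = pvFold m 5 := by
    simp [pvFold]
  rw [hfold, Int.toNat_natCast]
  have hbp : (pvFold m 5).testBit 0 = pvBitsParity m 32 := by
    rw [pvFold_parity 5 m]; norm_num
  rw [pvParityLoop_eq 32 m 0 hmlt, Nat.zero_xor, Nat.and_one_is_mod, ← hbp]
  rcases Nat.mod_two_eq_zero_or_one (pvFold m 5) with h | h <;>
    simp [Nat.testBit_zero, h]
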